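-- pv_equiv track=rewrite | github.com/LuqGon/guess-word | init_version/random_words.py | encryp_word_difficulty
-- ===== SOURCE A (Python) =====
-- def encryp_word_difficulty (type_dif,count_letter_word,list_letter_word):
--     encryp_word = []
--
--     for i in range(0, count_letter_word):
--         if type_dif == 1:
--             if count_letter_word >= 7 and (i == 0 or i == count_letter_word-1 or i == count_letter_word // 2):
--                 encryp_word.append(list_letter_word[i])
--             elif (count_letter_word >=5 and count_letter_word <7) and (i == 0 or i == count_letter_word-1):
--                 encryp_word.append(list_letter_word[i])
--             elif count_letter_word < 5 and i == 0:
--                 encryp_word.append(list_letter_word[i])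
--             else:
--                 encryp_word.append("_")
--         if type_dif == 2:
--
--             if count_letter_word >= 7 and (i == 0 or i == count_letter_word-1):
--                 encryp_word.append(list_letter_word[i])
--             elif (count_letter_word >=5 and count_letter_word <7) and i == 0:
--                 encryp_word.append(list_letter_word[i])
--             else:
--                 encryp_word.append("_")
--         if type_dif == 3:
--
--             if count_letter_word >= 9 and (i == 0 or i == count_letter_word-1):
--                 encryp_word.append(list_letter_word[i])
--             elif (count_letter_word >=7 and count_letter_word <9) and i == 0:
--                 encryp_word.append(list_letter_word[i])
--             else:
--                 encryp_word.append("_")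
--
--     return encryp_word
-- ===== SOURCE B (Python) =====
-- def encryp_word_difficulty(type_dif, count_letter_word, list_letter_word):
--     n = count_letter_word
--     if type_dif not in (1, 2, 3) or n <= 0:
--         return []
--     if type_dif == 1:
--         reveal = {0, n - 1, n // 2} if n >= 7 else {0, n - 1} if n >= 5 else {0}
--     elif type_dif == 2:
--         reveal = {0, n - 1} if n >= 7 else {0} if n >= 5 else set()
--     else:
--         reveal = {0, n - 1} if n >= 9 else {0} if n >= 7 else set()
--     result = ["_"] * n
--     for i in reveal:
--         result[i] = list_letter_word[i]
--     return result
-- ===== Notes on version B (the rewrite author's own statement) =====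
-- stated objective: simpler
-- what changed: B replaces A's per-index triple-branch loop by computing the small reveal-index set from the difficulty and word length once, building a fully masked list and overwriting only the revealed positions.
import Mathlib
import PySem

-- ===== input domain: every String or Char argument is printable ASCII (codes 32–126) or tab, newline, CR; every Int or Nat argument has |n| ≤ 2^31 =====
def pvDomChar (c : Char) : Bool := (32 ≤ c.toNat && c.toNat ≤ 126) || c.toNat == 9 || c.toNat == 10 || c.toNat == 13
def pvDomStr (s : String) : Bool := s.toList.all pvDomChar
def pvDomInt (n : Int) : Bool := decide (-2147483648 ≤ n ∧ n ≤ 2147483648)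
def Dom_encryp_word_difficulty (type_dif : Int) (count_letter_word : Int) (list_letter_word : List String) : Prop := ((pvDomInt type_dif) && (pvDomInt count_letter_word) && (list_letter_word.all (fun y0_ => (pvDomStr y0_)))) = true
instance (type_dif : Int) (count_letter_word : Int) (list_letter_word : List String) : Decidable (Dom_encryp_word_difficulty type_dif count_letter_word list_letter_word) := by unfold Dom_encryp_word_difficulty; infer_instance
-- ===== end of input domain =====

-- B computes the reveal-index set once from difficulty and length and overwrites a masked list,
-- instead of A's per-index branch cascade inside the loop (objective: simpler).


-- ===== PORT A =====
-- literal transliteration of A; list_letter_word[i] is ported as pyGetD (the default never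
-- fires inside Pre_, which excludes exactly the IndexError inputs)
def encryp_word_difficulty (type_dif : Int) (count_letter_word : Int) (list_letter_word : List String) : List String :=
  (PySem.List.pyRange 0 count_letter_word 1).foldl (fun acc i =>
    let acc := if type_dif = 1 then
        acc ++ [if count_letter_word ≥ 7 ∧ (i = 0 ∨ i = count_letter_word - 1 ∨ i = PySem.Int.floordiv count_letter_word 2) then
                  PySem.List.pyGetD list_letter_word i "_"
                else if (count_letter_word ≥ 5 ∧ count_letter_word < 7) ∧ (i = 0 ∨ i = count_letter_word - 1) then
                  PySem.List.pyGetD list_letter_word i "_"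
                else if count_letter_word < 5 ∧ i = 0 then
                  PySem.List.pyGetD list_letter_word i "_"
                else "_"]
      else acc
    let acc := if type_dif = 2 then
        acc ++ [if count_letter_word ≥ 7 ∧ (i = 0 ∨ i = count_letter_word - 1) then
                  PySem.List.pyGetD list_letter_word i "_"
                else if (count_letter_word ≥ 5 ∧ count_letter_word < 7) ∧ i = 0 then
                  PySem.List.pyGetD list_letter_word i "_"
                else "_"]
      else acc
    let acc := if type_dif = 3 then
        acc ++ [if count_letter_word ≥ 9 ∧ (i = 0 ∨ i = count_letter_word - 1) then
                  PySem.List.pyGetD list_letter_word i "_"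
                else if (count_letter_word ≥ 7 ∧ count_letter_word < 9) ∧ i = 0 then
                  PySem.List.pyGetD list_letter_word i "_"
                else "_"]
      else acc
    acc) []

-- ===== PORT B =====
-- the set literals {0, n-1, n//2} etc. of Source B, as PySem.Set
def pvReveal_alt (type_dif : Int) (n : Int) : List Int :=
  if type_dif = 1 then
    if n ≥ 7 then PySem.Set.ofList [0, n - 1, PySem.Int.floordiv n 2]
    else if n ≥ 5 then PySem.Set.ofList [0, n - 1]
    else PySem.Set.ofList [0]
  else if type_dif = 2 then
    if n ≥ 7 then PySem.Set.ofList [0, n - 1]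
    else if n ≥ 5 then PySem.Set.ofList [0]
    else PySem.Set.empty
  else
    if n ≥ 9 then PySem.Set.ofList [0, n - 1]
    else if n ≥ 7 then PySem.Set.ofList [0]
    else PySem.Set.empty

-- result[i] = list_letter_word[i] ported via pySetD/pyGetD (totalised; exact inside Pre_)
def encryp_word_difficulty_alt (type_dif : Int) (count_letter_word : Int) (list_letter_word : List String) : List String :=
  if (type_dif ≠ 1 ∧ type_dif ≠ 2 ∧ type_dif ≠ 3) ∨ count_letter_word ≤ 0 then []
  else
    (pvReveal_alt type_dif count_letter_word).foldl
      (fun res i => PySem.List.pySetD res i (PySem.List.pyGetD list_letter_word i "_"))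
      (List.replicate count_letter_word.toNat "_")

-- ===== PRECONDITION & SPEC =====
-- Pre_ excludes exactly the inputs on which A raises IndexError: those where a reveal index
-- (0, or count_letter_word-1, per the difficulty thresholds) falls outside list_letter_word.
def Pre_encryp_word_difficulty (type_dif : Int) (count_letter_word : Int) (list_letter_word : List String) : Prop :=
  (((type_dif = 1 ∧ 5 ≤ count_letter_word) ∨ (type_dif = 2 ∧ 7 ≤ count_letter_word) ∨ (type_dif = 3 ∧ 9 ≤ count_letter_word)) →
      count_letter_word ≤ (list_letter_word.length : Int)) ∧
  (((type_dif = 1 ∧ 1 ≤ count_letter_word ∧ count_letter_word < 5) ∨ (type_dif = 2 ∧ 5 ≤ count_letter_word ∧ count_letter_word < 7) ∨ (type_dif = 3 ∧ 7 ≤ count_letter_word ∧ count_letter_word < 9)) →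
      1 ≤ (list_letter_word.length : Int))
instance (type_dif : Int) (count_letter_word : Int) (list_letter_word : List String) : Decidable (Pre_encryp_word_difficulty type_dif count_letter_word list_letter_word) := by unfold Pre_encryp_word_difficulty; infer_instance
def pvWitness_encryp_word_difficulty : Int × Int × List String := (1, 3, ["c", "a", "t"])

def Spec_encryp_word_difficulty (type_dif : Int) (count_letter_word : Int) (list_letter_word : List String) (out : List String) : Prop := out = encryp_word_difficulty_alt type_dif count_letter_word list_letter_word
instance (type_dif : Int) (count_letter_word : Int) (list_letter_word : List String) (out : List String) : Decidable (Spec_encryp_word_difficulty type_dif count_letter_word list_letter_word out) := by unfold Spec_encryp_word_difficulty; infer_instance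

-- ===== CLAIM (what is proved, stated in full; the proofs are below) =====
def Claim_equal_encryp_word_difficulty : Prop := ∀ (type_dif : Int) (count_letter_word : Int) (list_letter_word : List String), Dom_encryp_word_difficulty type_dif count_letter_word list_letter_word → Pre_encryp_word_difficulty type_dif count_letter_word list_letter_word → Spec_encryp_word_difficulty type_dif count_letter_word list_letter_word (encryp_word_difficulty type_dif count_letter_word list_letter_word)

-- ===== LEMMAS AND PROOFS =====

-- element k of the foldl-of-assignments over an index list R with nonneg in-range indices
lemma pv_foldl_set_getElem? (f : Int → String) :
    ∀ (R : List Int) (init : List String), (∀ i ∈ R, 0 ≤ i ∧ i < (init.length : Int)) →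
    ∀ k : Nat, (R.foldl (fun res i => PySem.List.pySetD res i (f i)) init)[k]? =
      if (k : Int) ∈ R then some (f k) else init[k]? := by
  intro R
  induction R with
  | nil => intro init _ k; simp
  | cons i R ih =>
    intro init hmem k
    have hi : 0 ≤ i ∧ i < (init.length : Int) := hmem i (by simp)
    have hset : PySem.List.pySetD init i (f i) = init.set i.toNat (f i) :=
      PySem.List.pySetD_of_nonneg _ _ hi.1
    have hlen : (PySem.List.pySetD init i (f i)).length = init.length := by
      simp [hset]
    rw [List.foldl_cons, ih _ (by intro j hj; rw [hlen]; exact hmem j (by simp [hj])) k]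
    by_cases hkR : (k : Int) ∈ R
    · simp [hkR]
    · rw [if_neg hkR, hset, List.getElem?_set]
      by_cases hki : (k : Int) = i
      · have hti : i.toNat = k := by omega
        have hklen : k < init.length := by omega
        simp [hti, hklen, List.mem_cons, hki]
      · have hti : ¬ (i.toNat = k) := by omega
        simp [hti, List.mem_cons, hkR, hki]

-- the masked word as a map over the range equals B's assignment loop
lemma pv_map_eq_foldl_set (n : Int) (xs : List String) (R : List Int) (f : Int → String)
    (hmem : ∀ i ∈ R, 0 ≤ i ∧ i < n)
    (hf : ∀ k : Nat, (k : Int) < n →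
        f k = if (k : Int) ∈ R then PySem.List.pyGetD xs k "_" else "_") :
    (PySem.List.pyRange 0 n 1).map f =
      R.foldl (fun res i => PySem.List.pySetD res i (PySem.List.pyGetD xs i "_"))
        (List.replicate n.toNat "_") := by
  apply List.ext_getElem?
  intro k
  rw [pv_foldl_set_getElem? (fun i => PySem.List.pyGetD xs i "_") R _
      (by intro i hi; have := hmem i hi; constructor; · exact this.1
          · simp only [List.length_replicate]; omega) k]
  by_cases hk : k < n.toNat
  · have hkn : (k : Int) < n := by omega
    have h0 : ((PySem.List.pyRange 0 n 1).map f)[k]? = some (f k) := by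
      rw [PySem.List.pyRange_one]
      simp [hk]
    rw [h0, hf k hkn]
    by_cases hkR : (k : Int) ∈ R
    · simp [hkR]
    · simp [hkR, hk]
  · have h0 : ((PySem.List.pyRange 0 n 1).map f)[k]? = none := by
      apply List.getElem?_eq_none
      simp only [List.length_map, PySem.List.length_pyRange_one]; omega
    have hkR : ¬ ((k : Int) ∈ R) := by
      intro h; have := hmem _ h; omega
    rw [h0]
    simp [hkR]
    omega

-- A's loop body for a fixed difficulty, as a per-index function
lemma pv_A_eq_map_1 (n : Int) (xs : List String) :
    encryp_word_difficulty 1 n xs = (PySem.List.pyRange 0 n 1).map (fun i =>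
      if n ≥ 7 ∧ (i = 0 ∨ i = n - 1 ∨ i = PySem.Int.floordiv n 2) then PySem.List.pyGetD xs i "_"
      else if (n ≥ 5 ∧ n < 7) ∧ (i = 0 ∨ i = n - 1) then PySem.List.pyGetD xs i "_"
      else if n < 5 ∧ i = 0 then PySem.List.pyGetD xs i "_"
      else "_") := by
  unfold encryp_word_difficulty
  simp only [show ((1:Int) = 2) = False by simp, show ((1:Int) = 3) = False by simp,
    if_pos, if_false]
  rw [PySem.List.foldl_append_singleton_eq_map]
  simp

lemma pv_A_eq_map_2 (n : Int) (xs : List String) :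
    encryp_word_difficulty 2 n xs = (PySem.List.pyRange 0 n 1).map (fun i =>
      if n ≥ 7 ∧ (i = 0 ∨ i = n - 1) then PySem.List.pyGetD xs i "_"
      else if (n ≥ 5 ∧ n < 7) ∧ i = 0 then PySem.List.pyGetD xs i "_"
      else "_") := by
  unfold encryp_word_difficulty
  simp only [show ((2:Int) = 1) = False by simp, show ((2:Int) = 3) = False by simp,
    if_true, if_false]
  rw [PySem.List.foldl_append_singleton_eq_map]
  simp

lemma pv_A_eq_map_3 (n : Int) (xs : List String) :
    encryp_word_difficulty 3 n xs = (PySem.List.pyRange 0 n 1).map (fun i =>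
      if n ≥ 9 ∧ (i = 0 ∨ i = n - 1) then PySem.List.pyGetD xs i "_"
      else if (n ≥ 7 ∧ n < 9) ∧ i = 0 then PySem.List.pyGetD xs i "_"
      else "_") := by
  unfold encryp_word_difficulty
  simp only [show ((3:Int) = 1) = False by simp, show ((3:Int) = 2) = False by simp,
    if_true, if_false]
  rw [PySem.List.foldl_append_singleton_eq_map]
  simp

lemma pv_A_eq_nil_of_other (t n : Int) (xs : List String)
    (h1 : t ≠ 1) (h2 : t ≠ 2) (h3 : t ≠ 3) :
    encryp_word_difficulty t n xs = [] := by
  unfold encryp_word_difficulty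
  simp [h1, h2, h3]

lemma pv_B_eq_foldl (t n : Int) (xs : List String) (ht : t = 1 ∨ t = 2 ∨ t = 3) (hn : 0 < n) :
    encryp_word_difficulty_alt t n xs =
      (pvReveal_alt t n).foldl
        (fun res i => PySem.List.pySetD res i (PySem.List.pyGetD xs i "_"))
        (List.replicate n.toNat "_") := by
  unfold encryp_word_difficulty_alt
  rw [if_neg]
  rcases ht with h | h | h <;> simp [h] <;> omega

-- ===== VERDICT (by name: the statement is the Claim_ definition above) =====
theorem encryp_word_difficulty_spec : Claim_equal_encryp_word_difficulty := by
  intro t n xs _ hpre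
  unfold Spec_encryp_word_difficulty
  by_cases ht1 : t = 1
  · subst ht1
    rw [pv_A_eq_map_1]
    by_cases hn0 : 0 < n
    · rw [pv_B_eq_foldl 1 n xs (Or.inl rfl) hn0]
      unfold pvReveal_alt
      rw [if_pos rfl]
      by_cases h7 : n ≥ 7
      · have hd : PySem.Int.floordiv n 2 = n / 2 := PySem.Int.floordiv_eq_ediv_of_pos (by omega)
        rw [if_pos h7]
        apply pv_map_eq_foldl_set
        · intro i hi
          simp only [PySem.Set.mem_ofList, List.mem_cons, List.not_mem_nil, or_false] at hi
          rw [hd] at hi; omega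
        · intro k hk
          simp only [PySem.Set.mem_ofList, List.mem_cons, List.not_mem_nil, or_false]
          rw [hd]
          split_ifs <;> first | rfl | omega
      · rw [if_neg h7]
        by_cases h5 : n ≥ 5
        · rw [if_pos h5]
          apply pv_map_eq_foldl_set
          · intro i hi
            simp only [PySem.Set.mem_ofList, List.mem_cons, List.not_mem_nil, or_false] at hi
            omega
          · intro k hk
            simp only [PySem.Set.mem_ofList, List.mem_cons, List.not_mem_nil, or_false]
            split_ifs <;> first | rfl | omega
        · rw [if_neg h5]
          apply pv_map_eq_foldl_set
          · intro i hi
            simp only [PySem.Set.mem_ofList, List.mem_cons, List.not_mem_nil, or_false] at hi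
            omega
          · intro k hk
            simp only [PySem.Set.mem_ofList, List.mem_cons, List.not_mem_nil, or_false]
            split_ifs <;> first | rfl | omega
    · rw [PySem.List.pyRange_one_eq_nil (by omega)]
      unfold encryp_word_difficulty_alt
      rw [if_pos (Or.inr (by omega))]
      simp
  by_cases ht2 : t = 2
  · subst ht2
    rw [pv_A_eq_map_2]
    by_cases hn0 : 0 < n
    · rw [pv_B_eq_foldl 2 n xs (Or.inr (Or.inl rfl)) hn0]
      unfold pvReveal_alt
      simp only [show ((2:Int) = 1) = False by simp, if_false, if_true]
      by_cases h7 : n ≥ 7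
      · rw [if_pos h7]
        apply pv_map_eq_foldl_set
        · intro i hi
          simp only [PySem.Set.mem_ofList, List.mem_cons, List.not_mem_nil, or_false] at hi
          omega
        · intro k hk
          simp only [PySem.Set.mem_ofList, List.mem_cons, List.not_mem_nil, or_false]
          split_ifs <;> first | rfl | omega
      · rw [if_neg h7]
        by_cases h5 : n ≥ 5
        · rw [if_pos h5]
          apply pv_map_eq_foldl_set
          · intro i hi
            simp only [PySem.Set.mem_ofList, List.mem_cons, List.not_mem_nil, or_false] at hi
            omega
          · intro k hk
            simp only [PySem.Set.mem_ofList, List.mem_cons, List.not_mem_nil, or_false]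
            split_ifs <;> first | rfl | omega
        · rw [if_neg h5]
          apply pv_map_eq_foldl_set
          · intro i hi
            simp [PySem.Set.empty] at hi
          · intro k hk
            simp only [PySem.Set.empty, List.not_mem_nil, if_false]
            split_ifs <;> first | rfl | omega
    · rw [PySem.List.pyRange_one_eq_nil (by omega)]
      unfold encryp_word_difficulty_alt
      rw [if_pos (Or.inr (by omega))]
      simp
  by_cases ht3 : t = 3
  · subst ht3
    rw [pv_A_eq_map_3]
    by_cases hn0 : 0 < n
    · rw [pv_B_eq_foldl 3 n xs (Or.inr (Or.inr rfl)) hn0]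
      unfold pvReveal_alt
      simp only [show ((3:Int) = 1) = False by simp, show ((3:Int) = 2) = False by simp,
        if_false]
      by_cases h9 : n ≥ 9
      · rw [if_pos h9]
        apply pv_map_eq_foldl_set
        · intro i hi
          simp only [PySem.Set.mem_ofList, List.mem_cons, List.not_mem_nil, or_false] at hi
          omega
        · intro k hk
          simp only [PySem.Set.mem_ofList, List.mem_cons, List.not_mem_nil, or_false]
          split_ifs <;> first | rfl | omega
      · rw [if_neg h9]
        by_cases h7 : n ≥ 7
        · rw [if_pos h7]
          apply pv_map_eq_foldl_set
          · intro i hi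
            simp only [PySem.Set.mem_ofList, List.mem_cons, List.not_mem_nil, or_false] at hi
            omega
          · intro k hk
            simp only [PySem.Set.mem_ofList, List.mem_cons, List.not_mem_nil, or_false]
            split_ifs <;> first | rfl | omega
        · rw [if_neg h7]
          apply pv_map_eq_foldl_set
          · intro i hi
            simp [PySem.Set.empty] at hi
          · intro k hk
            simp only [PySem.Set.empty, List.not_mem_nil, if_false]
            split_ifs <;> first | rfl | omega
    · rw [PySem.List.pyRange_one_eq_nil (by omega)]
      unfold encryp_word_difficulty_alt
      rw [if_pos (Or.inr (by omega))]
      simp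
  · rw [pv_A_eq_nil_of_other t n xs ht1 ht2 ht3]
    unfold encryp_word_difficulty_alt
    rw [if_pos (Or.inl (And.intro ht1 (And.intro ht2 ht3)))]
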